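-- pv_equiv track=rewrite | github.com/btraven00/ob-test-collector | dummy_collector.py | parse_dynamic_args
-- ===== SOURCE A (Python) =====
-- def parse_dynamic_args(argv):
--     """Parse command line arguments with support for dynamic flags.
--
--     Dynamic flags like --methods.result capture all arguments until the next flag.
--     """
--     # First pass: group arguments by flags
--     grouped_args = {}
--     current_flag = None
--     i = 0
--
--     while i < len(argv):
--         arg = argv[i]
--
--         if arg.startswith("--"):
--             # New flag found
--             current_flag = arg
--             grouped_args[current_flag] = []
--         elif current_flag:
--             # Argument belongs to current flag
--             grouped_args[current_flag].append(arg)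
--         else:
--             # Positional argument (shouldn't happen with our usage)
--             if "__positional__" not in grouped_args:
--                 grouped_args["__positional__"] = []
--             grouped_args["__positional__"].append(arg)
--
--         i += 1
--
--     return grouped_args
-- ===== SOURCE B (Python) =====
-- def _span_nonflag(xs):
--     """Split xs into (longest prefix of non-flag args, remainder)."""
--     chunk = []
--     i = 0
--     while i < len(xs) and not xs[i].startswith("--"):
--         chunk.append(xs[i])
--         i += 1
--     return chunk, xs[i:]
--
--
-- def parse_dynamic_args(argv):
--     """Parse command line arguments with support for dynamic flags.
--
--     Chunked scan: peel off the pre-flag prefix, then repeatedly take a flag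
--     and the whole run of arguments up to the next flag, assigning the run as
--     one slice (dict assignment keeps last occurrence for duplicate flags).
--     """
--     grouped_args = {}
--     pre, rest = _span_nonflag(argv)
--     if pre:
--         grouped_args["__positional__"] = pre
--     while rest:
--         flag = rest[0]
--         group, rest = _span_nonflag(rest[1:])
--         grouped_args[flag] = group
--     return grouped_args
-- ===== Notes on version B (the rewrite author's own statement) =====
-- stated objective: alternative
-- what changed: Replaced A's element-at-a-time state machine (current-flag variable, per-element dict appends) by a chunked scan that splits argv into runs with a span helper and assigns each flag's whole run as one dict assignment.
import Mathlib
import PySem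

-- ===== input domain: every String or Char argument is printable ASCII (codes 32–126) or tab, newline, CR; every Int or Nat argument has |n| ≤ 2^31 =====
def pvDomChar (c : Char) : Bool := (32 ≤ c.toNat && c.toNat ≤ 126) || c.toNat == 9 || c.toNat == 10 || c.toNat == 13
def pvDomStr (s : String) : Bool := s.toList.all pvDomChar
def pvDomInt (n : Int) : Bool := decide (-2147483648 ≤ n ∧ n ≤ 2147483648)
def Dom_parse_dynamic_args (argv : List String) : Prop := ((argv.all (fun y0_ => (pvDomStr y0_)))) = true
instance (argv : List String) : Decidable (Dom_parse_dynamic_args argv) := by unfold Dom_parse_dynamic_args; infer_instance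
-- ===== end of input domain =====

-- B replaces A's element-at-a-time current-flag state machine by a chunked scan
-- (span off each flag's whole run and assign it in one dict assignment); same cost,
-- different decomposition.

-- ===== PORT A =====
-- one step of A's while loop: state = (grouped_args, current_flag)
def pvStepA (st : PySem.Dict String (List String) × Option String) (arg : String) :
    PySem.Dict String (List String) × Option String :=
  if PySem.Str.startswith arg "--" then
    (st.1.insert arg [], some arg)
  else
    match st.2 with
    | some f => (st.1.insert f (st.1.getD f [] ++ [arg]), some f)
    | none =>
      let d := if st.1.contains "__positional__" then st.1 else st.1.insert "__positional__" []
      (d.insert "__positional__" (d.getD "__positional__" [] ++ [arg]), none)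

def parse_dynamic_args (argv : List String) : List (String × List String) :=
  (argv.foldl pvStepA (PySem.Dict.empty, none)).1.items

-- ===== PORT B =====
-- _span_nonflag: longest prefix of non-flag args, and the remainder
def pvSpanNonflag : List String → List String × List String
  | [] => ([], [])
  | x :: xs =>
    if PySem.Str.startswith x "--" then ([], x :: xs)
    else
      let p := pvSpanNonflag xs
      (x :: p.1, p.2)

theorem pvSpanNonflag_snd_len (xs : List String) : (pvSpanNonflag xs).2.length ≤ xs.length := by
  induction xs with
  | nil => simp [pvSpanNonflag]
  | cons x xs ih =>
    simp only [pvSpanNonflag]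
    split
    · simp
    · simpa using Nat.le_succ_of_le ih

-- B's while loop over the remainder: take a flag and its whole run
def pvGroupsLoop (d : PySem.Dict String (List String)) : List String → PySem.Dict String (List String)
  | [] => d
  | f :: xs =>
    let p := pvSpanNonflag xs
    pvGroupsLoop (d.insert f p.1) p.2
  termination_by xs => xs.length
  decreasing_by exact Nat.lt_succ_of_le (pvSpanNonflag_snd_len xs)

def parse_dynamic_args_alt (argv : List String) : List (String × List String) :=
  let p := pvSpanNonflag argv
  let d0 : PySem.Dict String (List String) :=
    if p.1 = [] then PySem.Dict.empty else PySem.Dict.empty.insert "__positional__" p.1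
  (pvGroupsLoop d0 p.2).items

-- ===== PRECONDITION & SPEC =====
def Spec_parse_dynamic_args (argv : List String) (out : List (String × List String)) : Prop := out = parse_dynamic_args_alt argv
instance (argv : List String) (out : List (String × List String)) : Decidable (Spec_parse_dynamic_args argv out) := by unfold Spec_parse_dynamic_args; infer_instance

-- ===== CLAIM (what is proved, stated in full; the proofs are below) =====
def Claim_equal_parse_dynamic_args : Prop := ∀ (argv : List String), Dom_parse_dynamic_args argv → Spec_parse_dynamic_args argv (parse_dynamic_args argv)

-- ===== LEMMAS AND PROOFS =====

-- A's loop while a flag f is current: it accumulates f's run element by element;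
-- B assigns the whole run at once.
theorem pv_main (xs : List String) : ∀ (d : PySem.Dict String (List String)) (f : String)
    (acc : List String),
    (List.foldl pvStepA (d.insert f acc, some f) xs).1
      = pvGroupsLoop (d.insert f (acc ++ (pvSpanNonflag xs).1)) (pvSpanNonflag xs).2 := by
  induction xs with
  | nil => intro d f acc; simp [pvSpanNonflag, pvGroupsLoop]
  | cons x xs ih =>
    intro d f acc
    by_cases hx : PySem.Str.startswith x "--" = true
    · simp only [List.foldl_cons, pvStepA, hx, if_pos, pvSpanNonflag]
      rw [ih (d.insert f acc) x []]
      simp [pvGroupsLoop]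
    · simp only [List.foldl_cons, pvStepA, hx, if_neg, Bool.false_eq_true, not_false_iff,
        pvSpanNonflag]
      rw [PySem.Dict.getD_insert_self, PySem.Dict.insert_insert_self, ih d f (acc ++ [x])]
      simp
  
-- A's loop before any flag, once "__positional__" holds acc: appends the rest of the prefix
theorem pv_pos (xs : List String) : ∀ (acc : List String),
    (List.foldl pvStepA (PySem.Dict.empty.insert "__positional__" acc, none) xs).1
      = pvGroupsLoop (PySem.Dict.empty.insert "__positional__" (acc ++ (pvSpanNonflag xs).1))
          (pvSpanNonflag xs).2 := by
  induction xs with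
  | nil => intro acc; simp [pvSpanNonflag, pvGroupsLoop]
  | cons x xs ih =>
    intro acc
    by_cases hx : PySem.Str.startswith x "--" = true
    · simp only [List.foldl_cons, pvStepA, hx, if_pos, pvSpanNonflag]
      rw [pv_main xs (PySem.Dict.empty.insert "__positional__" acc) x []]
      simp [pvGroupsLoop]
    · simp only [List.foldl_cons, pvStepA, hx, if_neg, Bool.false_eq_true, not_false_iff,
        pvSpanNonflag, PySem.Dict.contains_insert_self, if_true]
      rw [PySem.Dict.getD_insert_self, PySem.Dict.insert_insert_self, ih (acc ++ [x])]
      simp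

-- ===== VERDICT (by name: the statement is the Claim_ definition above) =====
theorem parse_dynamic_args_spec : Claim_equal_parse_dynamic_args := by
  intro argv _
  unfold Spec_parse_dynamic_args parse_dynamic_args parse_dynamic_args_alt
  cases argv with
  | nil => simp [pvSpanNonflag, pvGroupsLoop]
  | cons x xs =>
    by_cases hx : PySem.Str.startswith x "--" = true
    · simp only [List.foldl_cons, pvStepA, hx, if_pos, pvSpanNonflag]
      rw [pv_main xs PySem.Dict.empty x []]
      simp [pvGroupsLoop]
    · simp only [List.foldl_cons, pvStepA, hx, if_neg, Bool.false_eq_true, not_false_iff,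
        pvSpanNonflag, PySem.Dict.contains_empty]
      rw [PySem.Dict.getD_insert_self, PySem.Dict.insert_insert_self]
      simp only [List.nil_append]
      rw [pv_pos xs [x]]
      simp
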